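-- pv_equiv track=rewrite | github.com/hinasur/python-image-compression | comp5.py | decode_sort_indices
-- ===== SOURCE A (Python) =====
-- def to_factoradic(num):
--     factoradic = []
--     i = 1
--     while num > 0:
--         num, remainder = divmod(num, i)
--         factoradic.append(remainder)
--         i += 1
--     return factoradic[::-1]
--
-- def decode_sort_indices(encoded, size):
--     perm = to_factoradic(encoded)
--     perm = [0] * (size - len(perm)) + perm
--     arr = [0] * size
--     elements = list(range(size))
--     for i, p in enumerate(perm):
--         arr[i] = elements.pop(p)
--     return arr
-- ===== SOURCE B (Python) =====
-- def decode_sort_indices(encoded, size):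
--     # factoradic digits of encoded, least-significant first
--     digits = []
--     num = encoded
--     i = 1
--     while num > 0:
--         num, r = divmod(num, i)
--         digits.append(r)
--         i += 1
--     used = [False] * size
--     out = []
--     lo = 0  # lowest index that may still be unused
--     for k in range(size):
--         d = digits[size - 1 - k] if size - 1 - k < len(digits) else 0
--         while lo < size and used[lo]:
--             lo += 1
--         # select the d-th (0-based) value not yet used, scanning from lo
--         j = lo
--         while used[j] or d > 0:
--             if not used[j]:
--                 d -= 1
--             j += 1
--         used[j] = True
--         out.append(j)
--     return out
-- ===== Notes on version B (the rewrite author's own statement) =====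
-- stated objective: faster
-- what changed: A reverses and zero-pads the factoradic digit list and repeatedly pops from a shrinking elements list (an O(size) element shift per step); B indexes the raw least-significant-first digit list directly and selects each output value by scanning a fixed boolean used-mask from a monotone lowest-unused pointer, so zero digits select in O(1) and no list is ever shifted.
import Mathlib
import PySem

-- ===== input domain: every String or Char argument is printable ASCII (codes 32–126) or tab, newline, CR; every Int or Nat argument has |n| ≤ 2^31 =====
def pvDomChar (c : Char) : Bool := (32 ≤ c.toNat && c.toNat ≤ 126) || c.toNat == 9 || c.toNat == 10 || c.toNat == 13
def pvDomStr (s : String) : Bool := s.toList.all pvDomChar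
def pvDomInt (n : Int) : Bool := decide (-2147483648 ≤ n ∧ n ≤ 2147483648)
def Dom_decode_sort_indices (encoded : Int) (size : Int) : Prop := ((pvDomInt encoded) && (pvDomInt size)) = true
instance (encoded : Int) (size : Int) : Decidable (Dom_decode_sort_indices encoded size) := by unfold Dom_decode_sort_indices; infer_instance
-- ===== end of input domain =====

-- B replaces A's reverse-pad-and-pop decoding by direct indexing into the raw digit list plus an
-- order-statistics scan over a fixed boolean mask from a monotone lowest-unused pointer (no list
-- mutation/shifting); objective: faster (measured on the generated timing inputs).

-- ===== PORT A =====
-- the while-loop 'while num > 0: num, r = divmod(num, i); append r; i += 1' (shared verbatim by both Pythons)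
def factoLoop (num i : Int) (acc : List Int) : List Int :=
  if hn : 0 < num then
    factoLoop (PySem.Int.floordiv num i) (i + 1) (acc ++ [PySem.Int.mod num i])
  else acc
termination_by 2 * num.toNat + (if i ≤ 1 then 1 else 0)
decreasing_by
  rcases lt_trichotomy i 1 with hi | hi | hi
  · have hf : PySem.Int.floordiv num i ≤ 0 := by
      rcases eq_or_lt_of_le (show i ≤ 0 by omega) with h0 | h0
      · subst h0; simp [PySem.Int.floordiv]
      · have h1 := PySem.Int.mod_neg_bounds (a := num) (b := i) h0
        have h2 := PySem.Int.floordiv_mul_add_mod num i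
        nlinarith [h1.1, h1.2]
    split_ifs <;> omega
  · subst hi
    have hf : PySem.Int.floordiv num 1 = num := by
      rw [PySem.Int.floordiv_eq_ediv_of_pos (by omega)]; exact Int.ediv_one num
    split_ifs <;> omega
  · have hlt : PySem.Int.floordiv num i < num := by
      rw [PySem.Int.floordiv_lt_iff_lt_mul (by omega)]; nlinarith
    have hge : 0 ≤ PySem.Int.floordiv num i := by
      rw [PySem.Int.floordiv_eq_ediv_of_pos (by omega)]
      exact Int.ediv_nonneg (by omega) (by omega)
    split_ifs <;> omega

def to_factoradic (num : Int) : List Int :=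
  (PySem.List.slice? (factoLoop num 1 []) none none (-1)).getD []   -- factoradic[::-1]

def decode_sort_indices (encoded : Int) (size : Int) : List Int :=
  let perm0 := to_factoradic encoded
  let perm := List.replicate (size - PySem.List.len perm0).toNat (0 : Int) ++ perm0
  let arr : List Int := List.replicate size.toNat (0 : Int)
  let elements := PySem.List.pyRange 0 size 1
  ((PySem.List.enumerate perm 0).foldl
    (fun (st : List Int × List Int) ip =>
      match PySem.List.pop? st.2 ip.2 with
      | some (v, rest) => (PySem.List.pySetD st.1 ip.1 v, rest)
      | none => st)                                  -- Python raises here (outside Pre_)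
    (arr, elements)).1

-- ===== PORT B =====
-- 'while lo < size and used[lo]: lo += 1'
def advGo (used : List Bool) (size lo : Int) : Int :=
  if h : lo < size ∧ PySem.List.pyGetD used lo false = true then advGo used size (lo + 1)
  else lo
termination_by (size - lo).toNat
decreasing_by omega

-- 'j = lo; while used[j] or d > 0: if not used[j]: d -= 1; j += 1' — scan with running index j
def selIdx (used : List Bool) (d j : Int) : Int :=
  if hj : 0 ≤ j ∧ j < PySem.List.len used then
    if PySem.List.pyGetD used j false || 0 < d then
      selIdx used (if PySem.List.pyGetD used j false then d else d - 1) (j + 1)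
    else j
  else j                                             -- Python raises IndexError here (outside Pre_)
termination_by (PySem.List.len used - j).toNat
decreasing_by simp only [PySem.List.len_eq] at hj ⊢; omega

def decode_sort_indices_alt (encoded : Int) (size : Int) : List Int :=
  let digits := factoLoop encoded 1 []
  (((PySem.List.pyRange 0 size 1).foldl
    (fun (st : (List Bool × List Int) × Int) k =>
      let idx := size - 1 - k
      let d : Int := if idx < PySem.List.len digits then PySem.List.pyGetD digits idx 0 else 0
      let lo := advGo st.1.1 size st.2
      let j := selIdx st.1.1 d lo
      ((PySem.List.pySetD st.1.1 j true, st.1.2 ++ [j]), lo))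
    ((List.replicate size.toNat false, []), 0)).1).2

-- ===== PRECONDITION & SPEC =====
-- Pre_ excludes exactly the inputs on which A raises IndexError: encoded ≥ size! (more factoradic
-- digits than slots) for size ≥ 0, and positive encoded with negative size.  Inside Dom every
-- encoded is at most 2^31 < 13!, so for size ≥ 13 the condition encoded < size! holds for ALL
-- Dom inputs; the 'if 13 ≤ size then true' branch states that directly (it admits every such
-- input, and only avoids evaluating an astronomically large factorial) — no input of Dom on
-- which A returns is excluded.
def Pre_decode_sort_indices (encoded : Int) (size : Int) : Prop :=
  (if 0 ≤ size then
     (if 13 ≤ size then true else decide (encoded < (Nat.factorial size.toNat : Int)))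
   else decide (encoded ≤ 0)) = true
instance (encoded : Int) (size : Int) : Decidable (Pre_decode_sort_indices encoded size) := by
  unfold Pre_decode_sort_indices; infer_instance

def pvWitness_decode_sort_indices : Int × Int := (4, 3)

def Spec_decode_sort_indices (encoded : Int) (size : Int) (out : List Int) : Prop := out = decode_sort_indices_alt encoded size
instance (encoded : Int) (size : Int) (out : List Int) : Decidable (Spec_decode_sort_indices encoded size out) := by unfold Spec_decode_sort_indices; infer_instance

-- ===== CLAIM (what is proved, stated in full; the proofs are below) =====
def Claim_equal_decode_sort_indices : Prop := ∀ (encoded : Int) (size : Int), Dom_decode_sort_indices encoded size → Pre_decode_sort_indices encoded size → Spec_decode_sort_indices encoded size (decode_sort_indices encoded size)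


-- ===== LEMMAS AND PROOFS =====

-- structural (cons) form of factoLoop's while loop, for reasoning
def digitsSpec (num i : Int) : List Int :=
  if hn : 0 < num then
    PySem.Int.mod num i :: digitsSpec (PySem.Int.floordiv num i) (i + 1)
  else []
termination_by 2 * num.toNat + (if i ≤ 1 then 1 else 0)
decreasing_by
  rcases lt_trichotomy i 1 with hi | hi | hi
  · have hf : PySem.Int.floordiv num i ≤ 0 := by
      rcases eq_or_lt_of_le (show i ≤ 0 by omega) with h0 | h0
      · subst h0; simp [PySem.Int.floordiv]
      · have h1 := PySem.Int.mod_neg_bounds (a := num) (b := i) h0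
        have h2 := PySem.Int.floordiv_mul_add_mod num i
        nlinarith [h1.1, h1.2]
    split_ifs <;> omega
  · subst hi
    have hf : PySem.Int.floordiv num 1 = num := by
      rw [PySem.Int.floordiv_eq_ediv_of_pos (by omega)]; exact Int.ediv_one num
    split_ifs <;> omega
  · have hlt : PySem.Int.floordiv num i < num := by
      rw [PySem.Int.floordiv_lt_iff_lt_mul (by omega)]; nlinarith
    have hge : 0 ≤ PySem.Int.floordiv num i := by
      rw [PySem.Int.floordiv_eq_ediv_of_pos (by omega)]
      exact Int.ediv_nonneg (by omega) (by omega)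
    split_ifs <;> omega

theorem factoLoop_eq (num i : Int) : ∀ acc, factoLoop num i acc = acc ++ digitsSpec num i := by
  induction num, i using digitsSpec.induct with
  | case1 num i hn ih =>
    intro acc
    rw [factoLoop, digitsSpec]
    simp only [dif_pos hn, ih]
    simp
  | case2 num i hn =>
    intro acc
    rw [factoLoop, digitsSpec]
    simp [hn]

def rising (i : Int) : Nat → Int
  | 0 => 1
  | n + 1 => i * rising (i + 1) n

theorem rising_succ_right : ∀ (n : Nat) (i : Int), rising i (n + 1) = rising i n * (i + n) := by
  intro n
  induction n with
  | zero => intro i; simp [rising]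
  | succ n ih =>
    intro i
    rw [show rising i (n+1+1) = i * rising (i+1) (n+1) from rfl, ih (i+1),
        show rising i (n+1) = i * rising (i+1) n from rfl]
    push_cast; ring

theorem rising_one_factorial : ∀ n : Nat, rising 1 n = (Nat.factorial n : Int) := by
  intro n
  induction n with
  | zero => simp [rising, Nat.factorial]
  | succ n ih => rw [rising_succ_right, ih, Nat.factorial_succ]; push_cast; ring

theorem digitsSpec_length_le : ∀ (n : Nat) (num i : Int), 0 < i → num < rising i n →
    (digitsSpec num i).length ≤ n := by
  intro n
  induction n with
  | zero =>
    intro num i hi hlt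
    rw [digitsSpec, dif_neg (by simp [rising] at hlt; omega)]
    simp
  | succ n ih =>
    intro num i hi hlt
    rw [digitsSpec]
    by_cases hn : 0 < num
    · rw [dif_pos hn]
      simp only [List.length_cons, Nat.add_le_add_iff_right]
      apply ih _ _ (by omega)
      rw [PySem.Int.floordiv_lt_iff_lt_mul hi]
      calc num < rising i (n+1) := hlt
        _ = rising (i+1) n * i := by rw [show rising i (n+1) = i * rising (i+1) n from rfl]; ring
    · rw [dif_neg hn]; simp

theorem digitsSpec_bounds : ∀ (num i : Int), 0 < i →
    ∀ (k : Nat) (h : k < (digitsSpec num i).length),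
      0 ≤ (digitsSpec num i)[k] ∧ (digitsSpec num i)[k] < i + k := by
  intro num i
  induction num, i using digitsSpec.induct with
  | case1 num i hn ih =>
    intro hi k hk
    have hcons : digitsSpec num i
        = PySem.Int.mod num i :: digitsSpec (PySem.Int.floordiv num i) (i + 1) := by
      rw [digitsSpec, dif_pos hn]
    simp only [hcons] at hk ⊢
    match k with
    | 0 =>
      simp only [List.getElem_cons_zero]
      exact ⟨PySem.Int.mod_nonneg _ hi, by have := PySem.Int.mod_lt (a := num) hi; push_cast; omega⟩
    | k + 1 =>
      simp only [List.getElem_cons_succ]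
      have := ih (by omega) k (by simpa using hk)
      push_cast
      constructor
      · exact this.1
      · have := this.2; push_cast at this; omega
  | case2 num i hn =>
    intro hi k hk
    have hnil : digitsSpec num i = [] := by rw [digitsSpec, dif_neg hn]
    simp [hnil] at hk

def Valid : List Int → Nat → Prop
  | [], _ => True
  | p :: ps, m => 0 ≤ p ∧ p < (m : Int) ∧ Valid ps (m - 1)

theorem Valid_of_bounds : ∀ (ps : List Int) (m : Nat), ps.length ≤ m →
    (∀ (k : Nat) (h : k < ps.length), 0 ≤ ps[k] ∧ ps[k] < (m : Int) - k) → Valid ps m := by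
  intro ps
  induction ps with
  | nil => intro m _ _; trivial
  | cons p ps ih =>
    intro m hlen hb
    have h0 := hb 0 (by simp)
    refine ⟨h0.1, by simpa using h0.2, ?_⟩
    apply ih (m - 1) (by simp at hlen; omega)
    intro k hk
    have := hb (k + 1) (by simpa using Nat.add_lt_add_right hk 1)
    simp only [List.getElem_cons_succ] at this
    have hm : 1 ≤ m := by simp at hlen; omega
    refine ⟨this.1, ?_⟩
    have := this.2
    push_cast [Nat.cast_sub hm] at *
    omega

def falseIdx : List Bool → List Nat
  | [] => []
  | b :: rest => if b then (falseIdx rest).map (· + 1) else 0 :: (falseIdx rest).map (· + 1)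

theorem falseIdx_replicate : ∀ n : Nat, falseIdx (List.replicate n false) = List.range n := by
  intro n
  induction n with
  | zero => simp [falseIdx]
  | succ n ih => rw [List.replicate_succ, falseIdx, if_neg (by simp), ih, List.range_succ_eq_map]


-- abstract decoder: pop the p-th element of es, recurse
def popSeq : List Int → List Int → List Int
  | [], _ => []
  | p :: ps, es => es.getD p.toNat 0 :: popSeq ps (es.eraseIdx p.toNat)

def esOf (used : List Bool) : List Int := (falseIdx used).map (fun (n : Nat) => (n : Int))

-- reference form of B's scan: structural scan of the whole mask from index 0
def selGo (used : List Bool) (d : Int) (j : Int) : Int :=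
  match used with
  | [] => j
  | b :: rest => if b || 0 < d then selGo rest (if b then d else d - 1) (j + 1) else j

theorem selGo_eq : ∀ (used : List Bool) (d j : Int), 0 ≤ d → d.toNat < (falseIdx used).length →
    selGo used d j = j + ((falseIdx used).getD d.toNat 0 : Int) := by
  intro used
  induction used with
  | nil => intro d j _ h; simp [falseIdx] at h
  | cons b rest ih =>
    intro d j hd h
    cases b with
    | true =>
      rw [selGo]
      simp only [Bool.true_or, if_pos trivial]
      rw [falseIdx] at h ⊢
      simp only [if_true, List.length_map] at h ⊢
      rw [ih d (j+1) hd h]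
      have hlt : d.toNat < (falseIdx rest).length := h
      rw [List.getD_eq_getElem _ _ hlt, List.getD_eq_getElem _ _ (by simpa using hlt),
          List.getElem_map]
      push_cast; ring
    | false =>
      rw [selGo]
      simp only [Bool.false_or]
      rw [falseIdx] at h ⊢
      simp only [Bool.false_eq_true, if_false] at h ⊢
      by_cases hpos : 0 < d
      · rw [if_pos (by simpa using hpos)]
        have h1 : (d - 1).toNat < (falseIdx rest).length := by
          simp at h; omega
        rw [ih (d-1) (j+1) (by omega) h1]
        rw [List.getD_eq_getElem _ _ h1,
            List.getD_eq_getElem _ _ (by simpa using h)]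
        have hk : d.toNat = (d-1).toNat + 1 := by omega
        rw [getElem_congr rfl hk (by omega), List.getElem_cons_succ, List.getElem_map]
        push_cast; ring
      · rw [if_neg (by simpa using hpos)]
        have : d = 0 := by omega
        subst this
        simp

theorem falseIdx_set : ∀ (used : List Bool) (d : Nat), d < (falseIdx used).length →
    falseIdx (used.set ((falseIdx used).getD d 0) true) = (falseIdx used).eraseIdx d := by
  intro used
  induction used with
  | nil => intro d h; simp [falseIdx] at h
  | cons b rest ih =>
    intro d h
    cases b with
    | true =>
      rw [falseIdx, if_pos rfl] at h ⊢
      simp only [List.length_map] at h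
      rw [List.getD_eq_getElem _ _ (by simpa using h), List.getElem_map,
          List.set_cons_succ, falseIdx, if_pos rfl,
          ← List.getD_eq_getElem _ _ h, ih d h, List.eraseIdx_map]
    | false =>
      rw [falseIdx, if_neg (by simp)] at h ⊢
      match d with
      | 0 =>
        simp only [List.getD_cons_zero, List.set_cons_zero, List.eraseIdx_cons_zero]
        rw [falseIdx, if_pos rfl]
      | d + 1 =>
        simp only [List.length_cons, List.length_map, Nat.add_lt_add_iff_right] at h
        rw [List.getD_cons_succ, List.getD_eq_getElem _ _ (by simpa using h), List.getElem_map,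
            List.set_cons_succ, List.eraseIdx_cons_succ, falseIdx, if_neg (by simp),
            ← List.getD_eq_getElem _ _ h, ih d h, List.eraseIdx_map]

-- all mask entries below m are already used
def prefixUsed (used : List Bool) (m : Nat) : Prop :=
  ∀ i : Nat, i < m → used.getD i false = true

theorem pyGetD_toNat (used : List Bool) (j : Int) (h : 0 ≤ j) :
    PySem.List.pyGetD used j false = used.getD j.toNat false := by
  have h2 := PySem.List.pyGetD_natCast (xs := used) (n := j.toNat) (d := false)
  rwa [show ((j.toNat : Nat) : Int) = j by omega] at h2

theorem advGo_spec : ∀ (used : List Bool) (size lo : Int), 0 ≤ lo → prefixUsed used lo.toNat →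
    0 ≤ advGo used size lo ∧ prefixUsed used (advGo used size lo).toNat := by
  intro used size lo
  induction lo using advGo.induct (used := used) (size := size) with
  | case1 lo h ih =>
    intro h0 hpre
    rw [advGo, dif_pos h]
    apply ih (by omega)
    intro i hi
    rcases Nat.lt_or_ge i lo.toNat with hc | hc
    · exact hpre i hc
    · have : i = lo.toNat := by omega
      subst this
      rw [← pyGetD_toNat used lo h0]
      exact h.2
  | case2 lo h =>
    intro h0 hpre
    rw [advGo, dif_neg h]
    exact ⟨h0, hpre⟩

theorem selIdx_drop : ∀ (n : Nat) (used : List Bool) (d j : Int), 0 ≤ j →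
    used.length ≤ j.toNat + n → selIdx used d j = selGo (used.drop j.toNat) d j := by
  intro n
  induction n with
  | zero =>
    intro used d j h0 hn
    rw [List.drop_eq_nil_of_le (by omega), selGo,
        selIdx, dif_neg (by simp only [PySem.List.len_eq]; omega)]
  | succ n ih =>
    intro used d j h0 hn
    by_cases hj : j.toNat < used.length
    · rw [selIdx, dif_pos ⟨h0, by simp only [PySem.List.len_eq]; omega⟩]
      rw [List.drop_eq_getElem_cons hj, selGo]
      have hb : PySem.List.pyGetD used j false = used[j.toNat] := by
        rw [pyGetD_toNat used j h0, List.getD_eq_getElem _ _ hj]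
      rw [hb]
      split_ifs with hc <;>
        first
          | rfl
          | (rw [show j.toNat + 1 = (j + 1).toNat by omega]
             exact ih used _ (j + 1) (by omega) (by omega))
    · rw [List.drop_eq_nil_of_le (by omega), selGo,
          selIdx, dif_neg (by simp only [PySem.List.len_eq]; omega)]

theorem falseIdx_prefix : ∀ (m : Nat) (used : List Bool), prefixUsed used m →
    falseIdx used = (falseIdx (used.drop m)).map (· + m) := by
  intro m
  induction m with
  | zero =>
    intro used _
    rw [List.drop_zero, show ((· + 0) : Nat → Nat) = id by funext x; simp, List.map_id]
  | succ m ih =>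
    intro used hpre
    cases used with
    | nil => simp [falseIdx]
    | cons b rest =>
      have hb : b = true := by simpa using hpre 0 (by omega)
      subst hb
      rw [falseIdx, if_pos rfl]
      have hpre' : prefixUsed rest m := fun i hi => by simpa using hpre (i + 1) (by omega)
      rw [ih rest hpre', List.drop_succ_cons, List.map_map]
      apply List.map_congr_left
      intro x _
      simp only [Function.comp_apply]
      omega

theorem selIdx_full (used : List Bool) (d lo : Int) (hd : 0 ≤ d) (h0 : 0 ≤ lo)
    (hpre : prefixUsed used lo.toNat) (hlt : d.toNat < (falseIdx used).length) :
    selIdx used d lo = ((falseIdx used).getD d.toNat 0 : Int) := by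
  rw [selIdx_drop used.length used d lo h0 (by omega)]
  have hF := falseIdx_prefix lo.toNat used hpre
  have hlen : (falseIdx (used.drop lo.toNat)).length = (falseIdx used).length := by
    rw [hF, List.length_map]
  rw [selGo_eq _ _ _ hd (by omega)]
  have hgd : (falseIdx used).getD d.toNat 0
      = (falseIdx (used.drop lo.toNat)).getD d.toNat 0 + lo.toNat := by
    rw [hF, List.getD_eq_getElem _ _ (by simpa using by omega : d.toNat < ((falseIdx (used.drop lo.toNat)).map (· + lo.toNat)).length),
        List.getElem_map, ← List.getD_eq_getElem _ _ (by omega)]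
  omega

theorem prefixUsed_set (used : List Bool) (m : Nat) (t : Nat) (hpre : prefixUsed used m) :
    prefixUsed (used.set t true) m := by
  intro i hi
  rcases Nat.lt_or_ge i used.length with hlen | hlen
  · rw [List.getD_eq_getElem _ _ (by simpa using hlen), List.getElem_set]
    split_ifs with ht
    · rfl
    · rw [← List.getD_eq_getElem _ _ hlen]
      exact hpre i hi
  · have h1 := hpre i hi
    rw [List.getD_eq_default _ _ hlen] at h1
    exact absurd h1 (by simp)

theorem foldB_eq : ∀ (ps : List Int) (used : List Bool) (out : List Int) (lo size : Int),
    (used.length : Int) = size → 0 ≤ lo → prefixUsed used lo.toNat →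
    Valid ps (falseIdx used).length →
    (((ps.foldl
      (fun (st : (List Bool × List Int) × Int) p =>
        ((PySem.List.pySetD st.1.1 (selIdx st.1.1 p (advGo st.1.1 size st.2)) true,
          st.1.2 ++ [selIdx st.1.1 p (advGo st.1.1 size st.2)]), advGo st.1.1 size st.2))
      ((used, out), lo)).1).2 : List Int) = out ++ popSeq ps (esOf used) := by
  intro ps
  induction ps with
  | nil => intro used out lo size _ _ _ _; simp [popSeq]
  | cons p ps ih =>
    intro used out lo size hsz hlo hpre hv
    obtain ⟨hp0, hplt, hv'⟩ := hv
    obtain ⟨hlo'0, hpre'⟩ := advGo_spec used size lo hlo hpre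
    have hlt : p.toNat < (falseIdx used).length := by omega
    have hsel : selIdx used p (advGo used size lo)
        = (((falseIdx used).getD p.toNat 0 : Nat) : Int) :=
      selIdx_full used p (advGo used size lo) hp0 hlo'0 hpre' hlt
    rw [List.foldl_cons]
    simp only [hsel, PySem.List.pySetD_natCast]
    rw [ih _ _ _ size (by rw [List.length_set]; exact hsz) hlo'0
          (prefixUsed_set used _ _ hpre')
          (by rw [falseIdx_set used p.toNat hlt, List.length_eraseIdx_of_lt hlt]; exact hv')]
    rw [popSeq]
    have hes : ((esOf used).getD p.toNat 0 : Int)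
        = (((falseIdx used).getD p.toNat 0 : Nat) : Int) := by
      rw [esOf, List.getD_eq_getElem _ _ (by simpa [esOf] using hlt), List.getElem_map,
          ← List.getD_eq_getElem _ _ hlt]
    have hesOf : esOf (used.set ((falseIdx used).getD p.toNat 0) true)
        = (esOf used).eraseIdx p.toNat := by
      rw [esOf, falseIdx_set used p.toNat hlt, esOf, List.eraseIdx_map]
    rw [hesOf, hes]
    simp

theorem foldA_eq : ∀ (ps : List Int) (es pre rest : List Int), Valid ps es.length →
    ps.length = rest.length →
    ((PySem.List.enumerate ps (pre.length : Int)).foldl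
      (fun (st : List Int × List Int) ip =>
        match PySem.List.pop? st.2 ip.2 with
        | some (v, r) => (PySem.List.pySetD st.1 ip.1 v, r)
        | none => st)
      (pre ++ rest, es)).1 = pre ++ popSeq ps es := by
  intro ps
  induction ps with
  | nil =>
    intro es pre rest _ hlen
    have : rest = [] := by
      cases rest with
      | nil => rfl
      | cons r rs => simp at hlen
    subst this
    simp [PySem.List.enumerate_nil, popSeq]
  | cons p ps ih =>
    intro es pre rest hv hlen
    obtain ⟨hp0, hplt, hv'⟩ := hv
    obtain ⟨r, rest', rfl⟩ : ∃ r rest', rest = r :: rest' := by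
      cases rest with
      | nil => simp at hlen
      | cons r rs => exact ⟨r, rs, rfl⟩
    have hplt' : p.toNat < es.length := by omega
    have hpop : PySem.List.pop? es p = some (es[p.toNat], es.eraseIdx p.toNat) := by
      have h := PySem.List.pop?_natCast (xs := es) (n := p.toNat) hplt'
      rwa [show ((p.toNat : Nat) : Int) = p by omega] at h
    rw [PySem.List.enumerate_cons, List.foldl_cons]
    simp only [hpop]
    have hset : PySem.List.pySetD (pre ++ r :: rest') (pre.length : Int) es[p.toNat]
        = (pre ++ [es[p.toNat]]) ++ rest' := by
      rw [PySem.List.pySetD_natCast, List.set_append_right _ _ (le_refl _)]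
      simp
    rw [hset]
    have harr : ((pre.length : Int) + 1) = (((pre ++ [es[p.toNat]]).length : Nat) : Int) := by
      simp
    rw [harr, ih (es.eraseIdx p.toNat) (pre ++ [es[p.toNat]]) rest'
          (by rw [List.length_eraseIdx_of_lt hplt']; exact hv') (by simpa using hlen)]
    rw [popSeq, List.getD_eq_getElem _ _ hplt']
    simp

-- ===== assembling both sides =====
theorem digitsSpec_nonpos (num i : Int) (h : num ≤ 0) : digitsSpec num i = [] := by
  rw [digitsSpec]; simp [show ¬ 0 < num by omega]

theorem to_facto_eq (num : Int) : to_factoradic num = (digitsSpec num 1).reverse := by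
  rw [to_factoradic, factoLoop_eq, List.nil_append, PySem.List.slice?_none_none_neg_one]
  rfl

theorem Valid_perm (encoded size : Int) (h0 : 0 ≤ size)
    (hlen : (digitsSpec encoded 1).length ≤ size.toNat) :
    Valid (List.replicate (size.toNat - (digitsSpec encoded 1).length) 0
             ++ (digitsSpec encoded 1).reverse) size.toNat := by
  apply Valid_of_bounds
  · simp; omega
  · intro k hk
    simp only [List.length_append, List.length_replicate, List.length_reverse] at hk
    have hkn : k < size.toNat := by omega
    by_cases hcase : k < size.toNat - (digitsSpec encoded 1).length
    · rw [List.getElem_append_left (by simpa using hcase)]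
      simp only [List.getElem_replicate]
      constructor
      · omega
      · omega
    · rw [List.getElem_append_right (by simp; omega)]
      rw [List.getElem_reverse]
      simp only [List.length_replicate]
      have hb := digitsSpec_bounds encoded 1 (by omega)
        ((digitsSpec encoded 1).length - 1 - (k - (size.toNat - (digitsSpec encoded 1).length)))
        (by omega)
      refine ⟨hb.1, ?_⟩
      have h2 := hb.2
      have hidx : (digitsSpec encoded 1).length - 1
          - (k - (size.toNat - (digitsSpec encoded 1).length)) = size.toNat - 1 - k := by omega
      simp only [hidx] at h2 ⊢
      have : ((size.toNat - 1 - k : Nat) : Int) = (size.toNat : Int) - 1 - k := by omega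
      rw [this] at h2
      omega

theorem main_neg (encoded size : Int) (hs : size < 0) (he : encoded ≤ 0) :
    decode_sort_indices encoded size = decode_sort_indices_alt encoded size := by
  rw [decode_sort_indices, decode_sort_indices_alt]
  rw [to_facto_eq, digitsSpec_nonpos encoded 1 he, factoLoop_eq, List.nil_append,
      digitsSpec_nonpos encoded 1 he]
  rw [PySem.List.pyRange_one_eq_nil (by omega)]
  simp [PySem.List.enumerate_nil, show size.toNat = 0 by omega]

theorem A_eq_popSeq (encoded size : Int) (h0 : 0 ≤ size)
    (hlen : (digitsSpec encoded 1).length ≤ size.toNat) :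
    decode_sort_indices encoded size =
      popSeq (List.replicate (size.toNat - (digitsSpec encoded 1).length) 0
                ++ (digitsSpec encoded 1).reverse)
             (PySem.List.pyRange 0 size 1) := by
  rw [decode_sort_indices, to_facto_eq]
  simp only [PySem.List.len_eq, List.length_reverse]
  rw [show (size - ((digitsSpec encoded 1).length : Int)).toNat
        = size.toNat - (digitsSpec encoded 1).length by omega]
  have hperm : (List.replicate (size.toNat - (digitsSpec encoded 1).length) (0 : Int)
      ++ (digitsSpec encoded 1).reverse).length = size.toNat := by simp; omega
  have hval : Valid (List.replicate (size.toNat - (digitsSpec encoded 1).length) (0 : Int)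
      ++ (digitsSpec encoded 1).reverse) (PySem.List.pyRange 0 size 1).length := by
    rw [PySem.List.length_pyRange_one, show (size - 0).toNat = size.toNat by omega]
    exact Valid_perm encoded size h0 hlen
  have h := foldA_eq (List.replicate (size.toNat - (digitsSpec encoded 1).length) (0 : Int)
      ++ (digitsSpec encoded 1).reverse) (PySem.List.pyRange 0 size 1) []
      (List.replicate size.toNat (0 : Int)) hval (by simpa using hperm)
  simpa using h

theorem B_eq_popSeq (encoded size : Int) (h0 : 0 ≤ size)
    (hlen : (digitsSpec encoded 1).length ≤ size.toNat) :
    decode_sort_indices_alt encoded size =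
      popSeq (List.replicate (size.toNat - (digitsSpec encoded 1).length) 0
                ++ (digitsSpec encoded 1).reverse)
             (PySem.List.pyRange 0 size 1) := by
  rw [decode_sort_indices_alt, factoLoop_eq, List.nil_append]
  have hmap : (PySem.List.pyRange 0 size 1).map
      (fun k => if size - 1 - k < PySem.List.len (digitsSpec encoded 1)
                then PySem.List.pyGetD (digitsSpec encoded 1) (size - 1 - k) 0 else (0 : Int))
      = List.replicate (size.toNat - (digitsSpec encoded 1).length) (0 : Int)
          ++ (digitsSpec encoded 1).reverse := by
    apply List.ext_getElem
    · simp [PySem.List.length_pyRange_one]; omega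
    · intro k h1 h2
      simp only [List.length_map, PySem.List.length_pyRange_one] at h1
      rw [List.getElem_map, PySem.List.getElem_pyRange_one, zero_add]
      simp only [PySem.List.len_eq]
      by_cases hcase : k < size.toNat - (digitsSpec encoded 1).length
      · rw [if_neg (by omega), List.getElem_append_left (by simpa using hcase),
            List.getElem_replicate]
      · rw [if_pos (by omega)]
        have ht : size - 1 - (k : Int) = ((size.toNat - 1 - k : Nat) : Int) := by omega
        rw [ht, PySem.List.pyGetD_natCast,
            List.getD_eq_getElem _ _ (by omega : size.toNat - 1 - k < (digitsSpec encoded 1).length),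
            List.getElem_append_right (by simp; omega), List.getElem_reverse]
        simp only [List.length_replicate]
        exact getElem_congr rfl (by omega) (by omega)
  have hfold := List.foldl_map
    (f := fun k => if size - 1 - k < PySem.List.len (digitsSpec encoded 1)
                   then PySem.List.pyGetD (digitsSpec encoded 1) (size - 1 - k) 0 else (0 : Int))
    (g := fun (st : (List Bool × List Int) × Int) p =>
      ((PySem.List.pySetD st.1.1 (selIdx st.1.1 p (advGo st.1.1 size st.2)) true,
        st.1.2 ++ [selIdx st.1.1 p (advGo st.1.1 size st.2)]), advGo st.1.1 size st.2))
    (l := PySem.List.pyRange 0 size 1)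
    (init := (((List.replicate size.toNat false, ([] : List Int)), 0) :
        (List Bool × List Int) × Int))
  rw [hmap] at hfold
  rw [show ((PySem.List.pyRange 0 size 1).foldl
        (fun (st : (List Bool × List Int) × Int) k =>
          let idx := size - 1 - k
          let d : Int := if idx < PySem.List.len (digitsSpec encoded 1)
                         then PySem.List.pyGetD (digitsSpec encoded 1) idx 0 else 0
          let lo := advGo st.1.1 size st.2
          let j := selIdx st.1.1 d lo
          ((PySem.List.pySetD st.1.1 j true, st.1.2 ++ [j]), lo))
        ((List.replicate size.toNat false, []), 0))
      = ((List.replicate (size.toNat - (digitsSpec encoded 1).length) (0 : Int)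
            ++ (digitsSpec encoded 1).reverse).foldl
          (fun (st : (List Bool × List Int) × Int) p =>
            ((PySem.List.pySetD st.1.1 (selIdx st.1.1 p (advGo st.1.1 size st.2)) true,
              st.1.2 ++ [selIdx st.1.1 p (advGo st.1.1 size st.2)]), advGo st.1.1 size st.2))
          ((List.replicate size.toNat false, []), 0)) from hfold.symm]
  rw [foldB_eq _ _ _ 0 size (by simp; omega) (by omega) (fun i hi => by simp at hi) (by
    rw [falseIdx_replicate, List.length_range]
    exact Valid_perm encoded size h0 hlen)]
  rw [show esOf (List.replicate size.toNat false) = PySem.List.pyRange 0 size 1 by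
    rw [esOf, falseIdx_replicate, PySem.List.pyRange_one,
        show (size - 0).toNat = size.toNat by omega]
    exact List.map_congr_left (fun k _ => by simp)]
  simp

-- ===== VERDICT (by name: the statement is the Claim_ definition above) =====
theorem decode_sort_indices_spec : Claim_equal_decode_sort_indices := by
  intro encoded size hdom hpre
  unfold Spec_decode_sort_indices
  unfold Pre_decode_sort_indices at hpre
  by_cases h0 : 0 ≤ size
  · rw [if_pos h0] at hpre
    have hfac : encoded < (Nat.factorial size.toNat : Int) := by
      by_cases h13 : 13 ≤ size
      · rw [if_pos h13] at hpre
        have hdom' : encoded ≤ 2147483648 := by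
          unfold Dom_decode_sort_indices pvDomInt at hdom
          simp only [Bool.and_eq_true, decide_eq_true_eq] at hdom
          exact hdom.1.2
        have h1 : (Nat.factorial 13 : Int) ≤ (Nat.factorial size.toNat : Int) := by
          exact_mod_cast Nat.factorial_le (by omega)
        have h2 : (2147483648 : Int) < (Nat.factorial 13 : Int) := by norm_num [Nat.factorial]
        omega
      · rw [if_neg h13] at hpre
        simpa using hpre
    have hlen : (digitsSpec encoded 1).length ≤ size.toNat := by
      apply digitsSpec_length_le size.toNat encoded 1 (by omega)
      rw [rising_one_factorial]
      exact hfac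
    rw [A_eq_popSeq encoded size h0 hlen, B_eq_popSeq encoded size h0 hlen]
  · rw [if_neg h0] at hpre
    simp only [decide_eq_true_eq] at hpre
    exact main_neg encoded size (by omega) hpre
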